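-- pv_equiv track=rewrite | github.com/ABCTreebank/ABCT-toolkit | abctk/ml/misc.py | generate_category
-- ===== SOURCE A (Python) =====
-- import typing
--
-- def generate_category(
--     head: str,
--     args: typing.Sequence[str],
--     is_bracketed = False
-- ) -> str:
--     if args:
--         return "{br_open}{others}\\{arg}{br_close}".format(
--             br_open = "(" if is_bracketed else "",
--             br_close = ")" if is_bracketed else "",
--             arg = args[0],
--             others = generate_category(head, args[1:], True)
--         )
--     else:
--         return head
-- ===== SOURCE B (Python) =====
-- def generate_category(head, args, is_bracketed=False):
--     if not args:
--         return head
--     acc = head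
--     for arg in reversed(args[1:]):
--         acc = "(" + acc + "\\" + arg + ")"
--     acc = acc + "\\" + args[0]
--     return "(" + acc + ")" if is_bracketed else acc
-- ===== Notes on version B (the rewrite author's own statement) =====
-- stated objective: faster
-- what changed: Replaces the slice-based right recursion with a single iterative pass: an accumulator starts at head and is wrapped once per inner argument while traversing the tail in reverse, with the outermost argument and top-level bracket handled after the loop; no per-call list slicing and no recursion depth.
import Mathlib
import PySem

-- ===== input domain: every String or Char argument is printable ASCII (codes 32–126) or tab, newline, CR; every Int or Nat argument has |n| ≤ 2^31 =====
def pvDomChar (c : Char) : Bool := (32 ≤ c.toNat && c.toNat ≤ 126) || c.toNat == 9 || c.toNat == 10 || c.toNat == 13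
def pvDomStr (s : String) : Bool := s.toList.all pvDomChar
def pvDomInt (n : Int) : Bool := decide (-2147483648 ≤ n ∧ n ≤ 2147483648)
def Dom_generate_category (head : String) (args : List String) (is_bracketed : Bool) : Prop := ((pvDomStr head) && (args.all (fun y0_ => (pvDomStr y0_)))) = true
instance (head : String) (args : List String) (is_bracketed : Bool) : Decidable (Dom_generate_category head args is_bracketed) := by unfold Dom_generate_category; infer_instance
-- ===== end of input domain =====

-- B: iterative reverse-pass with an accumulator instead of slice-based right recursion (alternative decomposition, same result).


-- ===== PORT A =====
def generate_category (head : String) (args : List String) (is_bracketed : Bool) : String :=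
  match args with
  | [] => head
  | a :: rest =>
      (if is_bracketed then "(" else "") ++ generate_category head rest true
        ++ "\\" ++ a ++ (if is_bracketed then ")" else "")

-- ===== PORT B =====
def generate_category_alt (head : String) (args : List String) (is_bracketed : Bool) : String :=
  match args with
  | [] => head
  | a0 :: rest =>
      let acc := rest.reverse.foldl
        (fun acc arg => "(" ++ acc ++ "\\" ++ arg ++ ")") head
      let acc := acc ++ "\\" ++ a0
      if is_bracketed then "(" ++ acc ++ ")" else acc

-- ===== PRECONDITION & SPEC =====
def Spec_generate_category (head : String) (args : List String) (is_bracketed : Bool) (out : String) : Prop := out = generate_category_alt head args is_bracketed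
instance (head : String) (args : List String) (is_bracketed : Bool) (out : String) : Decidable (Spec_generate_category head args is_bracketed out) := by unfold Spec_generate_category; infer_instance

-- ===== CLAIM (what is proved, stated in full; the proofs are below) =====
def Claim_equal_generate_category : Prop := ∀ (head : String) (args : List String) (is_bracketed : Bool), Dom_generate_category head args is_bracketed → Spec_generate_category head args is_bracketed (generate_category head args is_bracketed)

-- ===== LEMMAS AND PROOFS =====

-- ===== VERDICT (by name: the statement is the Claim_ definition above) =====
lemma gc_true_eq_foldl (head : String) (args : List String) :
    generate_category head args true
      = args.reverse.foldl (fun acc arg => "(" ++ acc ++ "\\" ++ arg ++ ")") head := by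
  induction args with
  | nil => simp [generate_category]
  | cons a rest ih =>
      simp [generate_category, ih, List.foldl_append]

-- ===== VERDICT (by name: the statement is the Claim_ definition above) =====
theorem generate_category_spec : Claim_equal_generate_category := by
  intro head args is_bracketed _
  unfold Spec_generate_category
  cases args with
  | nil => simp [generate_category, generate_category_alt]
  | cons a0 rest =>
      simp [generate_category, generate_category_alt, gc_true_eq_foldl]
      cases is_bracketed <;> simp [String.append_assoc]
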